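-- pv_equiv track=rewrite | github.com/Rlemons12/au_cetac_maint | modules/emtac_ai/training_scripts/performance_tst_model/comprehensive_parts_test.py | extract_entities_from_prediction
-- ===== SOURCE A (Python) =====
-- from typing import Dict, List, Tuple, Optional
--
-- def extract_entities_from_prediction(results: List[Dict]) -> Dict[str, List[str]]:
--     """(Kept for compatibility if needed elsewhere.)"""
--     entities = {'PART_NAME': [], 'MANUFACTURER': [], 'PART_NUMBER': [], 'MODEL': []}
--     for result in results:
--         entity_type = result['entity_group'].replace('B-', '').replace('I-', '')
--         if entity_type in entities:
--             word = result.get('word', result.get('text', '')).replace('##', '')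
--             entities[entity_type].append(word)
--     for entity_type in entities:
--         if entities[entity_type]:
--             entities[entity_type] = [' '.join(entities[entity_type])]
--     return entities
-- ===== SOURCE B (Python) =====
-- def extract_entities_from_prediction(results):
--     def norm(r):
--         return r['entity_group'].replace('B-', '').replace('I-', '')
--
--     def word(r):
--         return r.get('word', r.get('text', '')).replace('##', '')
--
--     entities = {}
--     for entity_type in ('PART_NAME', 'MANUFACTURER', 'PART_NUMBER', 'MODEL'):
--         words = [word(r) for r in results if norm(r) == entity_type]
--         entities[entity_type] = [' '.join(words)] if words else []
--     return entities
-- ===== Notes on version B (the rewrite author's own statement) =====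
-- stated objective: alternative
-- what changed: Instead of one grouping pass appending into four accumulator lists followed by a join pass over the dict, B iterates over the fixed tuple of the four entity types and builds each group directly by a filtering comprehension over results, joining immediately.
import Mathlib
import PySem

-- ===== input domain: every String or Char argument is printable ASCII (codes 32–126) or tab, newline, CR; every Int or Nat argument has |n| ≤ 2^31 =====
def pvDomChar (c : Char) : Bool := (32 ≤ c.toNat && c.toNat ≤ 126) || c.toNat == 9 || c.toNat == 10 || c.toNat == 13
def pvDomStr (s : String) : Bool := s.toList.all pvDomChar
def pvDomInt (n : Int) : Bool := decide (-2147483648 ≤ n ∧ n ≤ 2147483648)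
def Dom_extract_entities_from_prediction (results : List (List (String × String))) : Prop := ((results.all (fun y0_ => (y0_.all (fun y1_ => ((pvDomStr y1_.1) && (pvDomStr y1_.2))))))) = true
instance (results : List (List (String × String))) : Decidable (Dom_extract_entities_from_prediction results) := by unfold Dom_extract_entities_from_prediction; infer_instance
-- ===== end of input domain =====

-- B differs from A in decomposition only: per-entity-type filtering passes instead of one grouping pass + a join pass.

-- ===== PORT A =====
-- shared dict primitive: first-match lookup in an association list (Python dict access / .get)
def pvLookup? (r : List (String × String)) (k : String) : Option String :=
  (r.find? (fun p => p.1 == k)).map (·.2)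

-- result.get('word', result.get('text', '')).replace('##', '')
def pvWordOf (r : List (String × String)) : String :=
  PySem.Str.replace ((pvLookup? r "word").getD ((pvLookup? r "text").getD "")) "##" ""

-- result['entity_group'].replace('B-', '').replace('I-', '')  (getD "" is only reached outside Pre_)
def pvEntityType (r : List (String × String)) : String :=
  PySem.Str.replace (PySem.Str.replace ((pvLookup? r "entity_group").getD "") "B-" "") "I-" ""

-- the first loop of A: append the word into the accumulator of its entity type (if any)
def pvStepA (acc : List String × List String × List String × List String)
    (r : List (String × String)) : List String × List String × List String × List String :=
  let et := pvEntityType r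
  if et = "PART_NAME" then (acc.1 ++ [pvWordOf r], acc.2.1, acc.2.2.1, acc.2.2.2)
  else if et = "MANUFACTURER" then (acc.1, acc.2.1 ++ [pvWordOf r], acc.2.2.1, acc.2.2.2)
  else if et = "PART_NUMBER" then (acc.1, acc.2.1, acc.2.2.1 ++ [pvWordOf r], acc.2.2.2)
  else if et = "MODEL" then (acc.1, acc.2.1, acc.2.2.1, acc.2.2.2 ++ [pvWordOf r])
  else acc

-- the second loop of A: a non-empty bucket is collapsed to the single joined string
def pvJoinA (l : List String) : List String :=
  if l.isEmpty then l else [PySem.Str.join " " l]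

def extract_entities_from_prediction (results : List (List (String × String))) : List (String × List String) :=
  let e := results.foldl pvStepA ([], [], [], [])
  [("PART_NAME", pvJoinA e.1), ("MANUFACTURER", pvJoinA e.2.1),
   ("PART_NUMBER", pvJoinA e.2.2.1), ("MODEL", pvJoinA e.2.2.2)]

-- ===== PORT B =====
-- for each entity type in order: filter results, extract the words, join if non-empty
def pvGroupB (results : List (List (String × String))) (et : String) : List String :=
  let words := (results.filter (fun r => pvEntityType r == et)).map pvWordOf
  if words.isEmpty then [] else [PySem.Str.join " " words]

def extract_entities_from_prediction_alt (results : List (List (String × String))) : List (String × List String) :=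
  ["PART_NAME", "MANUFACTURER", "PART_NUMBER", "MODEL"].map (fun et => (et, pvGroupB results et))

-- ===== PRECONDITION & SPEC =====
-- Pre_ excludes results containing a dict without the key 'entity_group', on which A (and B) raise KeyError.
def Pre_extract_entities_from_prediction (results : List (List (String × String))) : Prop :=
  results.all (fun r => r.any (fun p => p.1 == "entity_group")) = true

instance (results : List (List (String × String))) : Decidable (Pre_extract_entities_from_prediction results) := by
  unfold Pre_extract_entities_from_prediction; infer_instance

def pvWitness_extract_entities_from_prediction : (List (List (String × String))) :=
  [[("entity_group", "B-MODEL"), ("word", "##pump")], [("entity_group", "X")]]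

def Spec_extract_entities_from_prediction (results : List (List (String × String))) (out : List (String × List String)) : Prop := out = extract_entities_from_prediction_alt results
instance (results : List (List (String × String))) (out : List (String × List String)) : Decidable (Spec_extract_entities_from_prediction results out) := by unfold Spec_extract_entities_from_prediction; infer_instance

-- ===== CLAIM (what is proved, stated in full; the proofs are below) =====
def Claim_equal_extract_entities_from_prediction : Prop := ∀ (results : List (List (String × String))), Dom_extract_entities_from_prediction results → Pre_extract_entities_from_prediction results → Spec_extract_entities_from_prediction results (extract_entities_from_prediction results)

-- ===== LEMMAS AND PROOFS =====

-- the grouping fold of A, characterised: each bucket is the filtered words appended to its accumulator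
lemma pvFoldA_eq (results : List (List (String × String))) (a b c d : List String) :
    results.foldl pvStepA (a, b, c, d) =
      (a ++ ((results.filter (fun r => pvEntityType r == "PART_NAME")).map pvWordOf),
       b ++ ((results.filter (fun r => pvEntityType r == "MANUFACTURER")).map pvWordOf),
       c ++ ((results.filter (fun r => pvEntityType r == "PART_NUMBER")).map pvWordOf),
       d ++ ((results.filter (fun r => pvEntityType r == "MODEL")).map pvWordOf)) := by
  induction results generalizing a b c d with
  | nil => simp
  | cons r rs ih =>
    simp only [List.foldl_cons, List.filter_cons]
    by_cases h1 : pvEntityType r = "PART_NAME"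
    · simp [pvStepA, h1, ih]
    · by_cases h2 : pvEntityType r = "MANUFACTURER"
      · simp [pvStepA, h2, ih]
      · by_cases h3 : pvEntityType r = "PART_NUMBER"
        · simp [pvStepA, h3, ih]
        · by_cases h4 : pvEntityType r = "MODEL"
          · simp [pvStepA, h4, ih]
          · simp [pvStepA, h1, h2, h3, h4, ih]

-- ===== VERDICT (by name: the statement is the Claim_ definition above) =====
theorem extract_entities_from_prediction_spec : Claim_equal_extract_entities_from_prediction := by
  intro results _ _
  unfold Spec_extract_entities_from_prediction extract_entities_from_prediction
    extract_entities_from_prediction_alt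
  simp only [pvFoldA_eq, List.nil_append, List.map_cons, List.map_nil]
  simp [pvGroupB, pvJoinA]
  refine ⟨?_, ?_, ?_, ?_⟩ <;>
    { split_ifs with h
      · simp only [List.map_eq_nil_iff, List.filter_eq_nil_iff, beq_iff_eq]; exact h
      · rfl }
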